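-- pv_equiv track=rewrite | github.com/starpacker/inverse-101 | tasks/shapelet_source_reconstruction/src/physics_model.py | iterate_n1_n2
-- ===== SOURCE A (Python) =====
-- def iterate_n1_n2(n_max):
--     """Generate (index, n1, n2) tuples in lenstronomy ordering.
--
--     Order: (0,0), (1,0), (0,1), (2,0), (1,1), (0,2), ...
--     Constraint: n1 + n2 <= n_max.
--     """
--     num_param = (n_max + 1) * (n_max + 2) // 2
--     n1, n2 = 0, 0
--     for i in range(num_param):
--         yield i, n1, n2
--         if n1 == 0:
--             n1 = n2 + 1
--             n2 = 0
--         else: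
--             n1 -= 1
--             n2 += 1
-- ===== SOURCE B (Python) =====
-- def iterate_n1_n2(n_max):
--     """Generate (index, n1, n2) tuples in lenstronomy ordering.
--
--     Emits whole diagonals n1+n2 = s (off = n2 running 0..s) until
--     num_param tuples have been produced; num_param is always a
--     triangular number, so the loop ends exactly at a diagonal boundary.
--     """
--     num_param = (n_max + 1) * (n_max + 2) // 2
--     i = 0
--     s = 0
--     while i < num_param:
--         for off in range(s + 1):
--             yield i + off, s - off, off
--         i += s + 1
--         s += 1
-- ===== Notes on version B (the rewrite author's own statement) =====
-- stated objective: alternative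
-- what changed: Replaced the per-item (n1,n2) state machine with branching update by a nested loop that emits whole diagonals n1+n2 = s directly, advancing the index by a full diagonal at a time (num_param is always a triangular number, so the count ends exactly at a diagonal boundary).
import Mathlib
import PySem

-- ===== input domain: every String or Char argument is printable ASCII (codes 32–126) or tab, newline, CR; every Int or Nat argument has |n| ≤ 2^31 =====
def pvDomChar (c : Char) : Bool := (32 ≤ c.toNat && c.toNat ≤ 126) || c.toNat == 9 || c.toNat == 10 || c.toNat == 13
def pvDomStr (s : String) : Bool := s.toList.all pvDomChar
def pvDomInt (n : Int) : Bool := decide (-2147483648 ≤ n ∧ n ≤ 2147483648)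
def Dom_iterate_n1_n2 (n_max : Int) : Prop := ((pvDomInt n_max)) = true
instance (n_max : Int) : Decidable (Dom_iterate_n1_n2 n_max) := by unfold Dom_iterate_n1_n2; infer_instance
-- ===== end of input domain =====

-- B replaces A's per-item (n1,n2) state machine by a nested loop emitting whole diagonals n1+n2 = s;
-- A is a Python generator: equivalence is about the sequence of yielded tuples (no argument is mutated).


-- ===== PORT A =====
-- the body of A's for-loop: yield (i, n1, n2), then update the (n1, n2) state machine
def aStep (st : Int × Int × List (Int × Int × Int)) (i : Int) : Int × Int × List (Int × Int × Int) :=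
  let n1 := st.1
  let n2 := st.2.1
  let acc := st.2.2 ++ [(i, n1, n2)]
  if n1 == 0 then (n2 + 1, 0, acc) else (n1 - 1, n2 + 1, acc)

def iterate_n1_n2 (n_max : Int) : List (Int × Int × Int) :=
  let num_param := PySem.Int.floordiv ((n_max + 1) * (n_max + 2)) 2
  ((PySem.List.pyRange 0 num_param 1).foldl aStep (0, 0, [])).2.2

-- ===== PORT B =====
-- B's while-loop: emit the whole diagonal s (inner 'for off in range(s+1)'), then i += s+1; s += 1
def altDiags (num_param : Int) (s : Nat) (i : Int) : List (Int × Int × Int) :=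
  if i < num_param then
    ((List.range (s + 1)).map (fun (off : Nat) => (i + (off : Int), ((s : Int) - (off : Int), (off : Int)))))
      ++ altDiags num_param (s + 1) (i + ((s : Int) + 1))
  else []
termination_by (num_param - i).toNat
decreasing_by omega

def iterate_n1_n2_alt (n_max : Int) : List (Int × Int × Int) :=
  let num_param := PySem.Int.floordiv ((n_max + 1) * (n_max + 2)) 2
  altDiags num_param 0 0

-- ===== PRECONDITION & SPEC =====
def Spec_iterate_n1_n2 (n_max : Int) (out : List (Int × Int × Int)) : Prop := out = iterate_n1_n2_alt n_max
instance (n_max : Int) (out : List (Int × Int × Int)) : Decidable (Spec_iterate_n1_n2 n_max out) := by unfold Spec_iterate_n1_n2; infer_instance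

-- ===== CLAIM (what is proved, stated in full; the proofs are below) =====
def Claim_equal_iterate_n1_n2 : Prop := ∀ (n_max : Int), Dom_iterate_n1_n2 n_max → Spec_iterate_n1_n2 n_max (iterate_n1_n2 n_max)

-- ===== LEMMAS AND PROOFS =====

-- the tuples A emits while walking down one diagonal, starting from state (n1, n2)
def diagList (n1 n2 : Nat) (i : Int) : List (Int × Int × Int) :=
  (List.range (n1 + 1)).map
    (fun (off : Nat) => (i + (off : Int), ((n1 : Int) - (off : Int), (n2 : Int) + (off : Int))))

theorem diagList_succ (n1 n2 : Nat) (i : Int) :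
    diagList (n1 + 1) n2 i = (i, ((n1 : Int) + 1, (n2 : Int))) :: diagList n1 (n2 + 1) (i + 1) := by
  rw [diagList, List.range_succ_eq_map, List.map_cons, List.map_map, diagList]
  refine congrArg₂ List.cons ?_ ?_
  · simp only [Prod.mk.injEq]
    refine ⟨?_, ?_, ?_⟩ <;> first | trivial | (push_cast; omega)
  · refine List.map_congr_left ?_
    intro off _
    simp only [Function.comp_apply, Prod.mk.injEq]
    refine ⟨?_, ?_, ?_⟩ <;> first | trivial | (push_cast; omega)

-- triangular numbers, recursively (tri k = 0 + 1 + ... + k)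
def tri : Nat → Nat
  | 0 => 0
  | k + 1 => tri k + (k + 1)

theorem tri_le_tri (s k : Nat) : tri s ≤ tri (s + k) := by
  induction k with
  | zero => exact le_refl _
  | succ k ih => calc tri s ≤ tri (s + k) := ih
                  _ ≤ tri (s + k) + (s + k + 1) := Nat.le_add_right _ _

-- one diagonal of A's fold: from state (n1, n2), the next n1+1 indices are emitted with n1
-- counting down and n2 counting up, ending in state (n1+n2+1, 0)
theorem foldA_diag (n1 : Nat) : ∀ (n2 : Nat) (i : Int) (acc : List (Int × Int × Int)),
    (PySem.List.pyRange i (i + ((n1 : Int) + 1)) 1).foldl aStep ((n1 : Int), (n2 : Int), acc)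
      = ((n1 : Int) + (n2 : Int) + 1, 0, acc ++ diagList n1 n2 i) := by
  induction n1 with
  | zero =>
      intro n2 i acc
      rw [show i + (((0 : Nat) : Int) + 1) = i + 1 by push_cast; ring,
        PySem.List.pyRange_one_singleton]
      simp [aStep, diagList]
  | succ n1 ih =>
      intro n2 i acc
      rw [PySem.List.pyRange_one_cons (by push_cast; omega), List.foldl_cons]
      have hstep : aStep ((((n1 + 1 : Nat)) : Int), ((n2 : Nat) : Int), acc) i
          = (((n1 : Nat) : Int), (((n2 + 1 : Nat)) : Int),
             acc ++ [(i, (((n1 + 1 : Nat)) : Int), ((n2 : Nat) : Int))]) := by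
        simp only [aStep]
        rw [if_neg (by simp only [beq_iff_eq]; push_cast; omega)]
        simp only [Prod.mk.injEq]
        refine ⟨?_, ?_, ?_⟩ <;> first | trivial | (push_cast; omega)
      rw [hstep,
        show i + (((n1 + 1 : Nat) : Int) + 1) = (i + 1) + ((n1 : Int) + 1) by push_cast; ring,
        ih (n2 + 1) (i + 1), diagList_succ]
      simp only [Prod.mk.injEq]
      refine ⟨?_, ?_, ?_⟩ <;> first | trivial | (push_cast; omega) | simp

-- A's fold over exactly tri (s+k) - tri s consecutive indices, starting at a diagonal
-- boundary (state (s, 0)), emits what B's altDiags emits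
theorem foldA_eq_altDiags (k : Nat) : ∀ (s : Nat) (i : Int) (acc : List (Int × Int × Int)) (np : Int),
    np - i = ((tri (s + k) : Int) - (tri s : Int)) →
    ((PySem.List.pyRange i np 1).foldl aStep ((s : Int), 0, acc)).2.2 = acc ++ altDiags np s i := by
  induction k with
  | zero =>
      intro s i acc np h
      rw [Nat.add_zero] at h
      rw [altDiags, if_neg (by omega), PySem.List.pyRange_one_eq_nil (by omega)]
      simp
  | succ k ih =>
      intro s i acc np h
      have htri : tri (s + (k + 1)) = tri (s + k) + (s + k + 1) := by
        rw [show s + (k + 1) = (s + k) + 1 from rfl]; rfl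
      have hle : tri s ≤ tri (s + k) := tri_le_tri s k
      have hlt : i < np := by push_cast [htri] at h; omega
      have hsplit : PySem.List.pyRange i np 1
          = PySem.List.pyRange i (i + ((s : Int) + 1)) 1 ++ PySem.List.pyRange (i + ((s : Int) + 1)) np 1 := by
        refine PySem.List.pyRange_one_append i (i + ((s : Int) + 1)) np (by omega) ?_
        push_cast [htri] at h ⊢
        omega
      have hz : ((0 : Int)) = (((0 : Nat)) : Int) := by norm_num
      rw [hsplit, List.foldl_append, hz, foldA_diag s 0 i acc]
      have hstate : ((s : Int) + (((0 : Nat)) : Int) + 1) = (((s + 1 : Nat)) : Int) := by push_cast; ring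
      rw [hstate, ih (s + 1) (i + ((s : Int) + 1)) (acc ++ diagList s 0 i) np
        (by have h1 : tri (s + 1) = tri s + (s + 1) := rfl
            have h2 : tri ((s + 1) + k) = tri (s + (k + 1)) := by rw [show (s + 1) + k = s + (k + 1) by omega]
            rw [h2, h1]
            push_cast [htri] at h ⊢
            omega)]
      have hrhs : altDiags np s i = diagList s 0 i ++ altDiags np (s + 1) (i + ((s : Int) + 1)) := by
        rw [altDiags, if_pos hlt]
        congr 1
        simp [diagList]
      rw [hrhs, List.append_assoc]

-- num_param is always a triangular number
theorem num_param_tri (n : Int) :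
    ∃ k : Nat, PySem.Int.floordiv ((n + 1) * (n + 2)) 2 = ((tri k : Nat) : Int) := by
  have two_mul_tri : ∀ k : Nat, 2 * tri k = k * (k + 1) := by
    intro k
    induction k with
    | zero => rfl
    | succ k ih => show 2 * (tri k + (k + 1)) = _; ring_nf; ring_nf at ih; omega
  have heven : (2 : Int) ∣ (n + 1) * (n + 2) := by
    obtain ⟨a, ha⟩ := Int.even_mul_succ_self (n + 1)
    exact ⟨a, by rw [show (n + 1) * (n + 2) = (n + 1) * (n + 1 + 1) by ring, ha]; ring⟩
  have hfd : PySem.Int.floordiv ((n + 1) * (n + 2)) 2 = (n + 1) * (n + 2) / 2 :=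
    PySem.Int.floordiv_eq_ediv_of_pos (by norm_num)
  have hdv : 2 * ((n + 1) * (n + 2) / 2) = (n + 1) * (n + 2) := Int.mul_ediv_cancel' heven
  by_cases hn : 0 ≤ n
  · refine ⟨(n + 1).toNat, ?_⟩
    have hc : (((n + 1).toNat : Nat) : Int) = n + 1 := Int.toNat_of_nonneg (by omega)
    have h2 : ((2 * tri (n + 1).toNat : Nat) : Int) = (n + 1) * (n + 2) := by
      rw [two_mul_tri]; push_cast [hc]; ring
    push_cast at h2
    omega
  · by_cases hn3 : n ≤ -3
    · refine ⟨(-n - 2).toNat, ?_⟩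
      have hc : (((-n - 2).toNat : Nat) : Int) = -n - 2 := Int.toNat_of_nonneg (by omega)
      have h2 : ((2 * tri (-n - 2).toNat : Nat) : Int) = (n + 1) * (n + 2) := by
        rw [two_mul_tri]; push_cast [hc]; ring
      push_cast at h2
      omega
    · refine ⟨0, ?_⟩
      have hM : (n + 1) * (n + 2) = 0 := by
        have : n = -1 ∨ n = -2 := by omega
        rcases this with h | h <;> rw [h] <;> ring
      rw [hfd, hM]
      rfl

-- ===== VERDICT (by name: the statement is the Claim_ definition above) =====
theorem iterate_n1_n2_spec : Claim_equal_iterate_n1_n2 := by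
  intro n hdom
  unfold Spec_iterate_n1_n2 iterate_n1_n2 iterate_n1_n2_alt
  obtain ⟨k, hk⟩ := num_param_tri n
  have := foldA_eq_altDiags k 0 0 [] (PySem.Int.floordiv ((n + 1) * (n + 2)) 2)
    (by rw [hk]
        show _ = ((tri (0 + k) : Nat) : Int) - ((tri 0 : Nat) : Int)
        rw [Nat.zero_add]
        show _ - (0 : Int) = _ - (((0 : Nat)) : Int)
        push_cast
        ring)
  simpa using this
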